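-- pv_equiv track=rewrite | github.com/shiwanshurockz/DSAPractice | Dynamic Programming/DP.4.4.PrintShortestCommonSuperSequence.LCS.py | SCSMatrixPrint
-- ===== SOURCE A (Python) =====
-- def SCSMatrixPrint(s1, s2):
--     n = len(s1)
--     m = len(s2)
--
--     matrixT = [[0 for j in range(m+1)] for i in range(n+1)]
--
--     for i in range(1, n+1):
--         for j in range(1, m+1):
--             if s1[i-1] == s2[j-1]:
--                 matrixT[i][j] = 1+matrixT[i-1][j-1]
--             else:
--                 matrixT[i][j] = max(matrixT[i-1][j], matrixT[i][j-1])
--     lcsString = ""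
--
--     i = n
--     j = m
--     while i > 0 and j > 0:
--         if s1[i-1] == s2[j-1]:
--             lcsString = lcsString + s1[i-1]
--             i = i-1
--             j = j-1
--         else:
--             if matrixT[i-1][j] > matrixT[i][j-1]:
--                 lcsString = lcsString + s1[i-1]
--                 i = i-1
--             else:
--                 lcsString = lcsString + s2[j - 1]
--                 j = j - 1
--     while(i > 0):
--         lcsString = lcsString+s1[i-1]
--         i = i-1
--     while (j > 0):
--         lcsString = lcsString + s2[j-1]
--         j = j - 1
--
--     return lcsString[::-1]
-- ===== SOURCE B (Python) =====
-- def SCSMatrixPrint(s1, s2):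
--     n, m = len(s1), len(s2)
--     w = m + 1
--     # flat min-table: dp[i*w + j] = length of shortest common supersequence of s1[:i], s2[:j]
--     dp = list(range(w))
--     for idx in range(w, (n + 1) * w):
--         i, j = divmod(idx, w)
--         if j == 0:
--             dp.append(i)
--         elif s1[i - 1] == s2[j - 1]:
--             dp.append(dp[idx - w - 1] + 1)
--         else:
--             dp.append(min(dp[idx - w], dp[idx - 1]) + 1)
--     out = ""
--     i, j = n, m
--     while i > 0 and j > 0:
--         if s1[i - 1] == s2[j - 1]:
--             out = s1[i - 1] + out
--             i -= 1
--             j -= 1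
--         elif dp[(i - 1) * w + j] < dp[i * w + j - 1]:
--             out = s1[i - 1] + out
--             i -= 1
--         else:
--             out = s2[j - 1] + out
--             j -= 1
--     return s2[:j] + s1[:i] + out
-- ===== Notes on version B (the rewrite author's own statement) =====
-- stated objective: alternative
-- what changed: B replaces A's nested-loop LCS max-table with a single flat one-dimensional shortest-common-supersequence min-table filled in one loop over flat indices (divmod for the cell coordinates), and builds the answer front-first by prepending with slice drains, so no final reversal is needed.
import Mathlib
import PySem

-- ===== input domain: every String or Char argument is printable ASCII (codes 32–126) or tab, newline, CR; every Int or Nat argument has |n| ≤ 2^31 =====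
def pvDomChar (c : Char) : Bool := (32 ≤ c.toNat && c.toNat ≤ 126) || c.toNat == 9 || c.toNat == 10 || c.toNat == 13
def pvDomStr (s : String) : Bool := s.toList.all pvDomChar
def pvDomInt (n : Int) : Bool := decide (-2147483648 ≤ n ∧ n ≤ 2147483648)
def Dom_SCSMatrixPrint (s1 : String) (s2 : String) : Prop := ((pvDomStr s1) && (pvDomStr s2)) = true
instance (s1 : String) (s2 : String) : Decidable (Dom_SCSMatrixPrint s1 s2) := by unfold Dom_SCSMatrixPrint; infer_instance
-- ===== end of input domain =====

-- B replaces A's nested-loop LCS max-table by a single flat 1-D shortest-common-supersequence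
-- min-table filled in one loop over flat indices, and builds the answer front-first (objective: alternative).

-- ===== PORT A =====
-- table lookup matrixT[i][j] (always in range where the Pythons read it)
def pvGetT (t : List (List Int)) (i j : Nat) : Int := (t.getD i []).getD j 0

-- inner j-loop of A's table fill: ps = rest of previous row, diag = matrixT[i-1][j-1], left = matrixT[i][j-1]
def pvRowA (c : Char) : List Int → Int → Int → List Char → List Int
  | p :: ps, diag, left, d :: ds =>
      (if c == d then diag + 1 else max p left) ::
        pvRowA c ps p (if c == d then diag + 1 else max p left) ds
  | _, _, _, _ => []

-- outer i-loop: rows of matrixT (column 0 stays 0)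
def pvBuildA (L2 : List Char) : List Char → List Int → List (List Int)
  | [], prev => [prev]
  | c :: cs, prev => prev :: pvBuildA L2 cs (0 :: pvRowA c (prev.drop 1) (prev.getD 0 0) 0 L2)

-- A's three while loops; characters are appended, the result is reversed at the end
def pvBackA (t : List (List Int)) (L1 L2 : List Char) : Nat → Nat → List Char → List Char
  | i+1, j+1, acc =>
      if L1.getD i ' ' == L2.getD j ' ' then pvBackA t L1 L2 i j (acc ++ [L1.getD i ' '])
      else if pvGetT t i (j+1) > pvGetT t (i+1) j then pvBackA t L1 L2 i (j+1) (acc ++ [L1.getD i ' '])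
      else pvBackA t L1 L2 (i+1) j (acc ++ [L2.getD j ' '])
  | i+1, 0, acc => pvBackA t L1 L2 i 0 (acc ++ [L1.getD i ' '])
  | 0, j+1, acc => pvBackA t L1 L2 0 j (acc ++ [L2.getD j ' '])
  | 0, 0, acc => acc
  termination_by i j _ => i + j

def SCSMatrixPrint (s1 : String) (s2 : String) : String :=
  let L1 := s1.toList
  let L2 := s2.toList
  let t := pvBuildA L2 L1 (List.replicate (L2.length + 1) 0)
  String.ofList ((pvBackA t L1 L2 L1.length L2.length []).reverse)

-- ===== PORT B =====
-- one table cell of B's flat 1-D min-table, at flat index idx (i = idx/w, j = idx%w)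
def pvCellB (L1 L2 : List Char) (w : Nat) (dp : List Int) (idx : Nat) : Int :=
  let i := idx / w
  let j := idx % w
  if j = 0 then (i : Int)
  else if L1.getD (i-1) ' ' == L2.getD (j-1) ' ' then dp.getD (idx - w - 1) 0 + 1
  else min (dp.getD (idx - w) 0) (dp.getD (idx - 1) 0) + 1

-- B's single fill loop over flat indices (k cells left to fill)
def pvFillB (L1 L2 : List Char) (w : Nat) : Nat → Nat → List Int → List Int
  | _,   0,   dp => dp
  | idx, k+1, dp => pvFillB L1 L2 w (idx+1) k (dp ++ [pvCellB L1 L2 w dp idx])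

-- B's backtrack: prepend, flat lookups, drains by slicing; output is already in order
def pvBackB (dp : List Int) (w : Nat) (L1 L2 : List Char) : Nat → Nat → List Char → List Char
  | i+1, j+1, acc =>
      if L1.getD i ' ' == L2.getD j ' ' then pvBackB dp w L1 L2 i j (L1.getD i ' ' :: acc)
      else if dp.getD (i * w + (j+1)) 0 < dp.getD ((i+1) * w + j) 0 then
        pvBackB dp w L1 L2 i (j+1) (L1.getD i ' ' :: acc)
      else pvBackB dp w L1 L2 (i+1) j (L2.getD j ' ' :: acc)
  | i, j, acc => L2.take j ++ L1.take i ++ acc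
  termination_by i j _ => i + j

def SCSMatrixPrint_alt (s1 : String) (s2 : String) : String :=
  let L1 := s1.toList
  let L2 := s2.toList
  let w := L2.length + 1
  let dp := pvFillB L1 L2 w w (L1.length * w) ((List.range w).map Int.ofNat)
  String.ofList (pvBackB dp w L1 L2 L1.length L2.length [])

-- ===== PRECONDITION & SPEC =====
def Spec_SCSMatrixPrint (s1 : String) (s2 : String) (out : String) : Prop := out = SCSMatrixPrint_alt s1 s2
instance (s1 : String) (s2 : String) (out : String) : Decidable (Spec_SCSMatrixPrint s1 s2 out) := by unfold Spec_SCSMatrixPrint; infer_instance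

-- ===== CLAIM (what is proved, stated in full; the proofs are below) =====
def Claim_equal_SCSMatrixPrint : Prop := ∀ (s1 : String) (s2 : String), Dom_SCSMatrixPrint s1 s2 → Spec_SCSMatrixPrint s1 s2 (SCSMatrixPrint s1 s2)

-- ===== LEMMAS AND PROOFS =====

-- mathematical LCS-length recurrence both tables are measured against
def pvLcs (L1 L2 : List Char) : Nat → Nat → Int
  | 0, _ => 0
  | _+1, 0 => 0
  | i+1, j+1 =>
      if L1.getD i ' ' == L2.getD j ' ' then pvLcs L1 L2 i j + 1
      else max (pvLcs L1 L2 i (j+1)) (pvLcs L1 L2 (i+1) j)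
  termination_by i j => i + j

lemma pvLcs_zero_left (L1 L2 : List Char) (j : Nat) : pvLcs L1 L2 0 j = 0 := by
  simp [pvLcs]

lemma pvLcs_zero_right (L1 L2 : List Char) (i : Nat) : pvLcs L1 L2 i 0 = 0 := by
  cases i <;> simp [pvLcs]

lemma pvLcs_succ (L1 L2 : List Char) (i j : Nat) :
    pvLcs L1 L2 (i+1) (j+1)
      = if L1.getD i ' ' == L2.getD j ' ' then pvLcs L1 L2 i j + 1
        else max (pvLcs L1 L2 i (j+1)) (pvLcs L1 L2 (i+1) j) := by
  rw [pvLcs]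

lemma pv_getD_drop (l : List Int) (k : Nat) : (l.drop 1).getD k 0 = l.getD (k+1) 0 := by
  simp [List.getD_eq_getElem?_getD]

lemma pv_getD_app_lt (l : List Int) (v : Int) (p : Nat) (h : p < l.length) :
    (l ++ [v]).getD p 0 = l.getD p 0 := by
  simp [List.getD_eq_getElem?_getD, List.getElem?_append_left h]

lemma pv_getD_app_eq (l : List Int) (v : Int) : (l ++ [v]).getD l.length 0 = v := by
  simp [List.getD_eq_getElem?_getD]

lemma pv_flat_div (w a b : Nat) (hb : b < w) : (b + a * w) / w = a := by
  rw [Nat.add_mul_div_right _ _ (by omega : 0 < w), Nat.div_eq_of_lt hb, Nat.zero_add]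

lemma pv_flat_mod (w a b : Nat) (hb : b < w) : (b + a * w) % w = b := by
  rw [Nat.add_mul_mod_self_right]; exact Nat.mod_eq_of_lt hb

lemma pv_rowA_len (c : Char) : ∀ (ds : List Char) (ps : List Int) (dA lA : Int),
    (pvRowA c ps dA lA ds).length = min ps.length ds.length := by
  intro ds
  induction ds with
  | nil => intro ps dA lA; cases ps <;> simp [pvRowA]
  | cons d ds ih => intro ps dA lA; cases ps <;> simp [pvRowA, ih]

lemma pv_rowA_spec (L1 L2 : List Char) (r : Nat) :
    ∀ (ds : List Char) (q : Nat) (ps : List Int) (diag left : Int),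
      ds = L2.drop q →
      ps.length = L2.length - q →
      (∀ k, k < ps.length → ps.getD k 0 = pvLcs L1 L2 r (q+1+k)) →
      diag = pvLcs L1 L2 r q → left = pvLcs L1 L2 (r+1) q →
      ∀ k, k < (pvRowA (L1.getD r ' ') ps diag left ds).length →
        (pvRowA (L1.getD r ' ') ps diag left ds).getD k 0 = pvLcs L1 L2 (r+1) (q+1+k) := by
  intro ds
  induction ds with
  | nil =>
    intro q ps diag left hds hlen hps hdiag hleft k hk
    cases ps <;> simp [pvRowA] at hk
  | cons d ds ih =>
    intro q ps diag left hds hlen hps hdiag hleft k hk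
    have hq : q < L2.length := by
      by_contra h
      rw [List.drop_eq_nil_of_le (Nat.le_of_not_lt h)] at hds
      simp at hds
    have hd : L2.getD q ' ' = d := by
      have h0 : (L2.drop q)[0]? = some d := by rw [← hds]; rfl
      rw [List.getElem?_drop, Nat.add_zero] at h0
      simp [List.getD_eq_getElem?_getD, h0]
    have hds' : ds = L2.drop (q+1) := by
      have := congrArg List.tail hds
      simpa [List.tail_drop] using this
    cases ps with
    | nil => simp only [List.length_nil] at hlen; omega
    | cons p ps =>
      have hp : p = pvLcs L1 L2 r (q+1) := by
        have := hps 0 (by simp)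
        simpa using this
      have hv : (if (L1.getD r ' ' == d) = true then diag + 1 else max p left)
          = pvLcs L1 L2 (r+1) (q+1) := by
        rw [hdiag, hleft, hp, pvLcs_succ, hd]
      simp only [pvRowA] at hk ⊢
      cases k with
      | zero => simpa using hv
      | succ k =>
        simp only [List.getD_cons_succ]
        have hlen' : ps.length = L2.length - (q+1) := by
          simp only [List.length_cons] at hlen; omega
        have hps' : ∀ k', k' < ps.length → ps.getD k' 0 = pvLcs L1 L2 r ((q+1)+1+k') := by
          intro k' hk'
          have h2 := hps (k'+1) (by simp only [List.length_cons]; omega)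
          rw [List.getD_cons_succ] at h2
          have e : q+1+(k'+1) = q+1+1+k' := by omega
          rwa [e] at h2
        simp only [List.length_cons] at hk
        have := ih (q+1) ps p _ hds' hlen' hps' hp hv k (by omega)
        have e2 : q+1+(k+1) = q+1+1+k := by omega
        rw [e2]
        exact this

lemma pv_buildA_spec (L1 L2 : List Char) :
    ∀ (cs : List Char) (r : Nat) (prev : List Int),
      cs = L1.drop r →
      prev.length = L2.length + 1 →
      (∀ k, k ≤ L2.length → prev.getD k 0 = pvLcs L1 L2 r k) →
      ∀ d k, d ≤ cs.length → k ≤ L2.length →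
        pvGetT (pvBuildA L2 cs prev) d k = pvLcs L1 L2 (r+d) k := by
  intro cs
  induction cs with
  | nil =>
    intro r prev hcs hlen hprev d k hd hk
    have hd0 : d = 0 := by simpa using hd
    subst hd0
    simpa [pvBuildA, pvGetT] using hprev k hk
  | cons c cs ih =>
    intro r prev hcs hlen hprev d k hd hk
    have hr : r < L1.length := by
      by_contra h
      rw [List.drop_eq_nil_of_le (Nat.le_of_not_lt h)] at hcs
      simp at hcs
    have hc : L1.getD r ' ' = c := by
      have h0 : (L1.drop r)[0]? = some c := by rw [← hcs]; rfl
      rw [List.getElem?_drop, Nat.add_zero] at h0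
      simp [List.getD_eq_getElem?_getD, h0]
    have hcs' : cs = L1.drop (r+1) := by
      have := congrArg List.tail hcs
      simpa [List.tail_drop] using this
    have hdl : (prev.drop 1).length = L2.length := by simp [hlen]
    have hlen' : ((0 : Int) :: pvRowA c (prev.drop 1) (prev.getD 0 0) 0 L2).length
        = L2.length + 1 := by
      rw [List.length_cons, pv_rowA_len, hdl, min_self]
    have hprev' : ∀ k, k ≤ L2.length →
        ((0 : Int) :: pvRowA c (prev.drop 1) (prev.getD 0 0) 0 L2).getD k 0
          = pvLcs L1 L2 (r+1) k := by
      intro k hk2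
      cases k with
      | zero => simp [pvLcs_zero_right]
      | succ k =>
        rw [List.getD_cons_succ, ← hc]
        have hps : ∀ k', k' < (prev.drop 1).length →
            (prev.drop 1).getD k' 0 = pvLcs L1 L2 r (0+1+k') := by
          intro k' hk'
          rw [pv_getD_drop]
          have hle : k' + 1 ≤ L2.length := by rw [hdl] at hk'; omega
          have h2 := hprev (k'+1) hle
          have e : 0+1+k' = k'+1 := by omega
          rw [e]; exact h2
        have hb : k < (pvRowA (L1.getD r ' ') (prev.drop 1) (prev.getD 0 0) 0 L2).length := by
          rw [pv_rowA_len, hdl, min_self]; omega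
        have h := pv_rowA_spec L1 L2 r L2 0 (prev.drop 1) (prev.getD 0 0) 0
          (by simp) (by simpa using hdl) hps (hprev 0 (by omega))
          (pvLcs_zero_right L1 L2 (r+1)).symm k hb
        have e : k+1 = 0+1+k := by omega
        rw [e]; exact h
    cases d with
    | zero => simpa [pvBuildA, pvGetT] using hprev k hk
    | succ d =>
      have hd' : d ≤ cs.length := by simp only [List.length_cons] at hd; omega
      have h := ih (r+1) _ hcs' hlen' hprev' d k hd' hk
      have e : r + (d+1) = (r+1) + d := by omega
      rw [e]
      simpa [pvBuildA, pvGetT] using h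

lemma pv_fillB_spec (L1 L2 : List Char) (w : Nat) (hw0 : 0 < w) :
    ∀ (k idx : Nat) (dp : List Int),
      w ≤ idx → idx + k ≤ (L1.length + 1) * w →
      dp.length = idx →
      (∀ p, p < idx → dp.getD p 0
        = ((p / w : Nat) : Int) + ((p % w : Nat) : Int) - pvLcs L1 L2 (p / w) (p % w)) →
      ∀ p, p < idx + k →
        (pvFillB L1 L2 w idx k dp).getD p 0
          = ((p / w : Nat) : Int) + ((p % w : Nat) : Int) - pvLcs L1 L2 (p / w) (p % w) := by
  intro k
  induction k with
  | zero =>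
    intro idx dp hwle hbound hlen hinv p hp
    simp only [pvFillB]
    exact hinv p (by omega)
  | succ k ih =>
    intro idx dp hwle hbound hlen hinv p hp
    have hj : idx % w < w := Nat.mod_lt _ hw0
    have hi1 : 1 ≤ idx / w := by
      rw [Nat.le_div_iff_mul_le hw0]; omega
    have hidx : w * (idx / w) + idx % w = idx := Nat.div_add_mod idx w
    have hv : pvCellB L1 L2 w dp idx
        = ((idx / w : Nat) : Int) + ((idx % w : Nat) : Int) - pvLcs L1 L2 (idx / w) (idx % w) := by
      obtain ⟨i', hi'⟩ : ∃ i', idx / w = i' + 1 := ⟨idx / w - 1, by omega⟩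
      simp only [pvCellB]
      by_cases hj0 : idx % w = 0
      · rw [if_pos hj0, hj0, pvLcs_zero_right]
        push_cast; ring
      · obtain ⟨j', hj'⟩ : ∃ j', idx % w = j' + 1 := ⟨idx % w - 1, by omega⟩
        have hj'w : j' + 1 < w := by omega
        have h2 : idx = i' * w + w + (j' + 1) := by rw [← hidx, hi', hj']; ring
        have h3 : (i' + 1) * w = i' * w + w := by ring
        have ha : dp.getD (idx - w - 1) 0
            = (i' : Int) + (j' : Int) - pvLcs L1 L2 i' j' := by
          have e : idx - w - 1 = j' + i' * w := by omega
          have hlt : j' + i' * w < idx := by omega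
          have h := hinv _ hlt
          rw [pv_flat_div w i' j' (by omega), pv_flat_mod w i' j' (by omega)] at h
          rw [e]; exact h
        have hb2 : dp.getD (idx - w) 0
            = (i' : Int) + ((j' + 1 : Nat) : Int) - pvLcs L1 L2 i' (j' + 1) := by
          have e : idx - w = (j' + 1) + i' * w := by omega
          have hlt : (j' + 1) + i' * w < idx := by omega
          have h := hinv _ hlt
          rw [pv_flat_div w i' (j'+1) hj'w, pv_flat_mod w i' (j'+1) hj'w] at h
          rw [e]; exact h
        have hc2 : dp.getD (idx - 1) 0
            = ((i' + 1 : Nat) : Int) + (j' : Int) - pvLcs L1 L2 (i' + 1) j' := by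
          have e : idx - 1 = j' + (i' + 1) * w := by omega
          have hlt : j' + (i' + 1) * w < idx := by omega
          have h := hinv _ hlt
          rw [pv_flat_div w (i'+1) j' (by omega), pv_flat_mod w (i'+1) j' (by omega)] at h
          rw [e]; exact h
        rw [if_neg hj0, hi', hj', Nat.add_sub_cancel, Nat.add_sub_cancel, pvLcs_succ,
          ha, hb2, hc2]
        by_cases hcd : (L1.getD i' ' ' == L2.getD j' ' ') = true
        · rw [if_pos hcd, if_pos hcd]; push_cast; omega
        · rw [if_neg hcd, if_neg hcd]; push_cast; omega
    simp only [pvFillB]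
    apply ih (idx + 1) (dp ++ [pvCellB L1 L2 w dp idx])
    · omega
    · omega
    · simp [hlen]
    · intro p' hp'
      rcases Nat.lt_or_ge p' idx with h | h
      · rw [pv_getD_app_lt _ _ _ (by omega : p' < dp.length)]
        exact hinv p' h
      · have hpe : p' = idx := by omega
        rw [hpe]
        have h2 := pv_getD_app_eq dp (pvCellB L1 L2 w dp idx)
        rw [hlen] at h2
        rw [h2]
        exact hv
    · omega

lemma pv_backA_i0 (t : List (List Int)) (L1 L2 : List Char) :
    ∀ (j : Nat) (acc : List Char), j ≤ L2.length →
      pvBackA t L1 L2 0 j acc = acc ++ (L2.take j).reverse := by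
  intro j
  induction j with
  | zero => intro acc h; simp [pvBackA]
  | succ j ih =>
    intro acc h
    have hj : j < L2.length := h
    rw [pvBackA, ih _ (Nat.le_of_succ_le h)]
    rw [List.take_add_one, List.reverse_append]
    simp [List.getElem?_eq_getElem hj, List.getD_eq_getElem?_getD]

lemma pv_backA_j0 (t : List (List Int)) (L1 L2 : List Char) :
    ∀ (i : Nat) (acc : List Char), i ≤ L1.length →
      pvBackA t L1 L2 i 0 acc = acc ++ (L1.take i).reverse := by
  intro i
  induction i with
  | zero => intro acc h; simp [pvBackA]
  | succ i ih =>
    intro acc h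
    have hi : i < L1.length := h
    rw [pvBackA, ih _ (Nat.le_of_succ_le h)]
    rw [List.take_add_one, List.reverse_append]
    simp [List.getElem?_eq_getElem hi, List.getD_eq_getElem?_getD]

lemma pv_back_rel (tA : List (List Int)) (dp : List Int) (L1 L2 : List Char) (w : Nat)
    (hA : ∀ i j, i ≤ L1.length → j ≤ L2.length → pvGetT tA i j = pvLcs L1 L2 i j)
    (hB : ∀ i j, i ≤ L1.length → j ≤ L2.length →
      dp.getD (i * w + j) 0 = (i : Int) + j - pvLcs L1 L2 i j) :
    ∀ (N i j : Nat) (acc : List Char), i + j ≤ N → i ≤ L1.length → j ≤ L2.length →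
      (pvBackA tA L1 L2 i j acc).reverse = pvBackB dp w L1 L2 i j acc.reverse := by
  intro N
  induction N with
  | zero =>
    intro i j acc hN hi hj
    obtain ⟨rfl, rfl⟩ : i = 0 ∧ j = 0 := by omega
    simp [pvBackA, pvBackB]
  | succ N ih =>
    intro i j acc hN hi hj
    match i, j with
    | 0, j =>
      rw [pv_backA_i0 tA L1 L2 j acc hj]
      cases j <;> simp [pvBackB]
    | i+1, 0 =>
      rw [pv_backA_j0 tA L1 L2 (i+1) acc hi]
      simp [pvBackB]
    | i+1, j+1 =>
      have hXA := hA i (j+1) (by omega) hj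
      have hYA := hA (i+1) j hi (by omega)
      have hXB := hB i (j+1) (by omega) hj
      have hYB := hB (i+1) j hi (by omega)
      by_cases hc : (L1.getD i ' ' == L2.getD j ' ') = true
      · rw [pvBackA, pvBackB, if_pos hc, if_pos hc]
        have := ih i j (acc ++ [L1.getD i ' ']) (by omega) (by omega) (by omega)
        simpa using this
      · by_cases hgt : pvGetT tA i (j+1) > pvGetT tA (i+1) j
        · have hlt : dp.getD (i * w + (j+1)) 0 < dp.getD ((i+1) * w + j) 0 := by
            rw [hXB, hYB]
            rw [hXA, hYA] at hgt
            push_cast at hgt ⊢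
            omega
          rw [pvBackA, pvBackB, if_neg hc, if_neg hc, if_pos hgt, if_pos hlt]
          have := ih i (j+1) (acc ++ [L1.getD i ' ']) (by omega) (by omega) hj
          simpa using this
        · have hnlt : ¬ dp.getD (i * w + (j+1)) 0 < dp.getD ((i+1) * w + j) 0 := by
            rw [hXB, hYB]
            rw [hXA, hYA] at hgt
            push_cast at hgt ⊢
            omega
          rw [pvBackA, pvBackB, if_neg hc, if_neg hc, if_neg hgt, if_neg hnlt]
          have := ih (i+1) j (acc ++ [L2.getD j ' ']) (by omega) hi (by omega)
          simpa using this

-- ===== VERDICT (by name: the statement is the Claim_ definition above) =====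
theorem SCSMatrixPrint_spec : Claim_equal_SCSMatrixPrint := by
  intro s1 s2 _
  unfold Spec_SCSMatrixPrint SCSMatrixPrint SCSMatrixPrint_alt
  simp only []
  have hA : ∀ i j, i ≤ s1.toList.length → j ≤ s2.toList.length →
      pvGetT (pvBuildA s2.toList s1.toList (List.replicate (s2.toList.length + 1) 0)) i j
        = pvLcs s1.toList s2.toList i j := by
    intro i j hi hj
    have hrep : ∀ k, k ≤ s2.toList.length →
        (List.replicate (s2.toList.length + 1) (0 : Int)).getD k 0
          = pvLcs s1.toList s2.toList 0 k := by
      intro k hk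
      have hklt : k < s2.toList.length + 1 := by omega
      rw [pvLcs_zero_left]
      simp only [List.getD_eq_getElem?_getD, List.getElem?_replicate]
      split <;> rfl
    have h := pv_buildA_spec s1.toList s2.toList s1.toList 0
      (List.replicate (s2.toList.length + 1) 0) (by simp) (by simp) hrep i j hi hj
    simpa using h
  have hinv0 : ∀ p, p < s2.toList.length + 1 →
      (((List.range (s2.toList.length + 1)).map Int.ofNat).getD p 0 : Int)
        = ((p / (s2.toList.length + 1) : Nat) : Int) + ((p % (s2.toList.length + 1) : Nat) : Int)
          - pvLcs s1.toList s2.toList (p / (s2.toList.length + 1)) (p % (s2.toList.length + 1)) := by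
    intro p hp
    rw [Nat.div_eq_of_lt hp, Nat.mod_eq_of_lt hp, pvLcs_zero_left]
    have hp2 : p < s2.length + 1 := by simpa using hp
    simp [List.getD_eq_getElem?_getD, hp2]
  have hscs := pv_fillB_spec s1.toList s2.toList (s2.toList.length + 1) (Nat.succ_pos _)
    (s1.toList.length * (s2.toList.length + 1)) (s2.toList.length + 1)
    ((List.range (s2.toList.length + 1)).map Int.ofNat)
    le_rfl
    (by
      have e : (s1.toList.length + 1) * (s2.toList.length + 1)
          = (s2.toList.length + 1) + s1.toList.length * (s2.toList.length + 1) := by ring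
      omega)
    (by simp) hinv0
  have hB : ∀ i j, i ≤ s1.toList.length → j ≤ s2.toList.length →
      (pvFillB s1.toList s2.toList (s2.toList.length + 1) (s2.toList.length + 1)
          (s1.toList.length * (s2.toList.length + 1))
          ((List.range (s2.toList.length + 1)).map Int.ofNat)).getD
        (i * (s2.toList.length + 1) + j) 0
        = (i : Int) + j - pvLcs s1.toList s2.toList i j := by
    intro i j hi hj
    have hjw : j < s2.toList.length + 1 := by omega
    have hmul : i * (s2.toList.length + 1) ≤ s1.toList.length * (s2.toList.length + 1) :=
      Nat.mul_le_mul_right _ hi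
    have hlt : j + i * (s2.toList.length + 1)
        < (s2.toList.length + 1) + s1.toList.length * (s2.toList.length + 1) := by omega
    have h := hscs (j + i * (s2.toList.length + 1)) hlt
    rw [pv_flat_div _ _ _ hjw, pv_flat_mod _ _ _ hjw] at h
    have e : i * (s2.toList.length + 1) + j = j + i * (s2.toList.length + 1) := by omega
    rw [e]; exact h
  have h := pv_back_rel _ _ s1.toList s2.toList (s2.toList.length + 1) hA hB
    (s1.toList.length + s2.toList.length) s1.toList.length s2.toList.length []
    le_rfl le_rfl le_rfl
  simp only [List.reverse_nil] at h
  rw [h]
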